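-- pv_equiv track=rewrite | github.com/Kinetikm/AppliedPythonF2019 | homeworks/homework_02/beautiful_output.py | lenth
-- ===== SOURCE A (Python) =====
-- def lenth(info, num_col):
--     info_length = [[len(str(item)) for item in line] for line in info]
--     widths = [0 for _ in range(num_col)]
--     for line in info_length:
--         for i in range(num_col):
--             if widths[i] < line[i]:
--                 widths[i] = line[i]
--     return widths
-- ===== SOURCE B (Python) =====
-- def digits(n):
--     d = 0
--     while n:
--         d += 1
--         n //= 10
--     return d
--
--
-- def col_width(col):
--     if not col:
--         return 0
--     hi = max(col)
--     lo = min(col)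
--     w = 0
--     if hi >= 0:
--         w = digits(hi) if hi else 1
--     if lo < 0:
--         w = max(w, digits(-lo) + 1)
--     return w
--
--
-- def lenth(info, num_col):
--     return [col_width([line[i] for line in info]) for i in range(num_col)]
-- ===== Notes on version B (the rewrite author's own statement) =====
-- stated objective: alternative
-- what changed: Instead of computing len(str(x)) for every cell and keeping running maxima, B takes only the min and max of each column and derives the column width arithmetically (digit count by repeated //10 on the two extremes), using that string width is monotone on non-negative and on negative ints; str() is never called.
import Mathlib
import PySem

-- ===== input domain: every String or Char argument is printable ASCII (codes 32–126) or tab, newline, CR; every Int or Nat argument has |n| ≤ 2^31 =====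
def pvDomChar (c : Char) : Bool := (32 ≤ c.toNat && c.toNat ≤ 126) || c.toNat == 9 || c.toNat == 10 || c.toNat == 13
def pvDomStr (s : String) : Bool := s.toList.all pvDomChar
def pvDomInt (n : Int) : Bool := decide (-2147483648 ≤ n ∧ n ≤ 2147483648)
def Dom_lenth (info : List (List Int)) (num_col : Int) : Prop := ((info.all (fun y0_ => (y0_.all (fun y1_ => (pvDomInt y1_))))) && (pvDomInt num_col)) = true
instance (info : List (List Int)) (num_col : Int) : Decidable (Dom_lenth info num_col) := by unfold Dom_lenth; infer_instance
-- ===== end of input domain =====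

-- B derives each column's width arithmetically from just the column's min and max (digit
-- count by repeated //10), using monotonicity of int string width; no per-cell str().


-- ===== PORT A =====
-- literal port: length matrix, zero-initialised widths, nested row-major update loop
def lenth (info : List (List Int)) (num_col : Int) : List Int :=
  let info_length := info.map (fun line => line.map (fun item => PySem.Str.len (PySem.Int.toStr item)))
  let widths := (PySem.List.pyRange 0 num_col 1).map (fun _ => (0 : Int))
  info_length.foldl (fun widths line =>
    (PySem.List.pyRange 0 num_col 1).foldl (fun w i =>
      if PySem.List.pyGetD w i 0 < PySem.List.pyGetD line i 0 then
        PySem.List.pySetD w i (PySem.List.pyGetD line i 0)   -- pyGetD/pySetD total forms: in range under Pre_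
      else w) widths) widths

-- ===== PORT B =====
-- port of Source B's digits(n): 'while n: d += 1; n //= 10'. Source B only calls it with n > 0;
-- the n ≤ 0 guard (Python tests n != 0) only makes the recursion total, same values where called.
def digitsB (n : Int) (d : Int) : Int :=
  if h : n ≤ 0 then d
  else digitsB (PySem.Int.floordiv n 10) (d + 1)
termination_by n.toNat
decreasing_by
  rw [PySem.Int.floordiv_eq_ediv_of_pos (by norm_num)]
  omega

-- port of Source B's col_width: width from the column's two extremes only
def colWidth (col : List Int) : Int :=
  if col.isEmpty then 0
  else
    let hi := (PySem.List.max? col (fun x => x)).getD 0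
    let lo := (PySem.List.min? col (fun x => x)).getD 0
    let w0 : Int := if 0 ≤ hi then (if hi = 0 then 1 else digitsB hi 0) else 0
    if lo < 0 then max w0 (digitsB (-lo) 0 + 1) else w0

def lenth_alt (info : List (List Int)) (num_col : Int) : List Int :=
  (PySem.List.pyRange 0 num_col 1).map (fun i =>
    colWidth (info.map (fun line => PySem.List.pyGetD line i 0)))

-- ===== PRECONDITION & SPEC =====
-- Pre_ excludes exactly the inputs where both Pythons raise IndexError: num_col > 0 and some row shorter than num_col.
def Pre_lenth (info : List (List Int)) (num_col : Int) : Prop :=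
  num_col ≤ 0 ∨ ∀ line ∈ info, num_col ≤ (line.length : Int)
instance (info : List (List Int)) (num_col : Int) : Decidable (Pre_lenth info num_col) := by unfold Pre_lenth; infer_instance
def pvWitness_lenth : List (List Int) × Int := ([[3, -12], [456, 7]], 2)
def Spec_lenth (info : List (List Int)) (num_col : Int) (out : List Int) : Prop := out = lenth_alt info num_col
instance (info : List (List Int)) (num_col : Int) (out : List Int) : Decidable (Spec_lenth info num_col out) := by unfold Spec_lenth; infer_instance

-- ===== CLAIM (what is proved, stated in full; the proofs are below) =====
def Claim_equal_lenth : Prop := ∀ (info : List (List Int)) (num_col : Int), Dom_lenth info num_col → Pre_lenth info num_col → Spec_lenth info num_col (lenth info num_col)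

-- ===== LEMMAS AND PROOFS =====

-- abbreviation used only in the proofs: the width A computes for one cell
def W (x : Int) : Int := PySem.Str.len (PySem.Int.toStr x)

-- proof-only digit counter on Nat, mirroring the decimal length
def digCount (n : Nat) : Nat :=
  if h : n < 10 then 1 else digCount (n / 10) + 1
termination_by n
decreasing_by exact Nat.div_lt_self (by omega) (by norm_num)

lemma digCount_of_lt {n : Nat} (h : n < 10) : digCount n = 1 := by
  rw [digCount, dif_pos h]

lemma digCount_of_ge {n : Nat} (h : ¬ n < 10) : digCount n = digCount (n / 10) + 1 := by
  rw [digCount, dif_neg h]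

lemma digCount_pos (n : Nat) : 1 ≤ digCount n := by
  by_cases h : n < 10
  · rw [digCount_of_lt h]
  · rw [digCount_of_ge h]; omega

lemma digCount_mono : ∀ (b a : Nat), a ≤ b → digCount a ≤ digCount b := by
  intro b
  induction b using Nat.strong_induction_on with
  | _ b ih =>
    intro a hab
    by_cases hb : b < 10
    · rw [digCount_of_lt hb, digCount_of_lt (by omega)]
    · rw [digCount_of_ge hb]
      by_cases ha : a < 10
      · have := digCount_pos (b / 10)
        rw [digCount_of_lt ha]; omega
      · rw [digCount_of_ge ha]
        have := ih (b / 10) (Nat.div_lt_self (by omega) (by norm_num)) (a / 10)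
          (Nat.div_le_div_right hab)
        omega

lemma toDigitsCore_len : ∀ (f n : Nat) (l : List Char), n < f →
    (Nat.toDigitsCore 10 f n l).length = digCount n + l.length := by
  intro f
  induction f with
  | zero => intro n l h; omega
  | succ f ih =>
    intro n l h
    by_cases h10 : n / 10 = 0
    · simp only [Nat.toDigitsCore, h10, if_true, List.length_cons]
      rw [digCount_of_lt (by omega)]; omega
    · simp only [Nat.toDigitsCore, h10, if_false]
      rw [ih (n / 10) _ (by omega), digCount_of_ge (n := n) (by omega)]
      simp; omega

lemma toDigits_len (n : Nat) : (Nat.toDigits 10 n).length = digCount n := by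
  have := toDigitsCore_len (n + 1) n [] (by omega)
  simpa [Nat.toDigits] using this

lemma W_eq (x : Int) :
    W x = if x < 0 then (digCount x.natAbs : Int) + 1 else (digCount x.toNat : Int) := by
  unfold W
  rw [PySem.Str.len_eq, PySem.Int.toList_toStr]
  unfold PySem.Int.toChars
  split_ifs with h
  · simp [toDigits_len]
  · simp [toDigits_len]

lemma W_pos (x : Int) : 1 ≤ W x := by
  rw [W_eq]
  have h1 := digCount_pos x.natAbs
  have h2 := digCount_pos x.toNat
  split_ifs <;> omega

lemma digitsB_eq : ∀ (k : Nat) (n : Int), n.toNat ≤ k → 0 < n → ∀ d : Int,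
    digitsB n d = d + (digCount n.toNat : Int) := by
  intro k
  induction k with
  | zero => intro n h hn; omega
  | succ k ih =>
    intro n h hn d
    rw [digitsB, dif_neg (by omega), PySem.Int.floordiv_eq_ediv_of_pos (by norm_num)]
    by_cases h10 : n < 10
    · have hz : n / 10 = 0 := by omega
      rw [hz, digitsB, dif_pos le_rfl]
      rw [digCount_of_lt (by omega)]
      omega
    · have hpos : 0 < n / 10 := by omega
      rw [ih (n / 10) (by omega) hpos (d + 1)]
      have h1 : (n / 10).toNat = n.toNat / 10 := by omega
      rw [digCount_of_ge (n := n.toNat) (by omega), h1]; push_cast; ring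

-- W of a positive number is computed by digitsB, of a negative one by digitsB on -x plus the sign
lemma W_of_pos (x : Int) (hx : 0 < x) : W x = digitsB x 0 := by
  rw [digitsB_eq x.toNat x le_rfl hx 0, W_eq, if_neg (by omega)]; omega

lemma W_of_neg (x : Int) (hx : x < 0) : W x = digitsB (-x) 0 + 1 := by
  rw [digitsB_eq (-x).toNat (-x) le_rfl (by omega) 0, W_eq, if_pos hx,
    show (-x).toNat = x.natAbs from by omega]
  omega

-- folding max: bounds
lemma init_le_foldl (f : Int → Int) : ∀ (xs : List Int) (a : Int),
    a ≤ xs.foldl (fun acc x => max acc (f x)) a := by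
  intro xs
  induction xs with
  | nil => intro a; simp
  | cons x t ih =>
    intro a
    simp only [List.foldl_cons]
    exact le_trans (le_max_left a (f x)) (ih (max a (f x)))

lemma mem_le_foldl (f : Int → Int) : ∀ (xs : List Int) (a m : Int), m ∈ xs →
    f m ≤ xs.foldl (fun acc x => max acc (f x)) a := by
  intro xs
  induction xs with
  | nil => intro a m hm; simp at hm
  | cons x t ih =>
    intro a m hm
    simp only [List.foldl_cons]
    rcases List.mem_cons.mp hm with rfl | hm
    · exact le_trans (le_max_right a (f m)) (init_le_foldl f t _)
    · exact ih _ m hm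

lemma foldl_max_le (f : Int → Int) : ∀ (xs : List Int) (a R : Int), a ≤ R →
    (∀ x ∈ xs, f x ≤ R) → xs.foldl (fun acc x => max acc (f x)) a ≤ R := by
  intro xs
  induction xs with
  | nil => intro a R ha _; simpa using ha
  | cons x t ih =>
    intro a R ha h
    simp only [List.foldl_cons]
    exact ih _ R (max_le ha (h x List.mem_cons_self)) (fun y hy => h y (List.mem_cons_of_mem _ hy))

-- the heart: A's per-column running max equals B's extremes-based width
lemma colWidth_eq (col : List Int) :
    col.foldl (fun a x => max a (W x)) 0 = colWidth col := by
  rcases hcol : col with _ | ⟨c, t⟩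
  · simp [colWidth]
  rw [← hcol]
  have hne : col ≠ [] := by rw [hcol]; simp
  obtain ⟨hi, hmax⟩ : ∃ m, PySem.List.max? col (fun x => x) = some m := by
    cases h : PySem.List.max? col (fun x => x) with
    | none => exact absurd ((PySem.List.max?_eq_none_iff col (fun x => x)).mp h) hne
    | some m => exact ⟨m, rfl⟩
  obtain ⟨lo, hmin⟩ : ∃ m, PySem.List.min? col (fun x => x) = some m := by
    cases h : PySem.List.min? col (fun x => x) with
    | none => exact absurd ((PySem.List.min?_eq_none_iff col (fun x => x)).mp h) hne
    | some m => exact ⟨m, rfl⟩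
  have hi_mem : hi ∈ col := PySem.List.max?_mem hmax
  have lo_mem : lo ∈ col := PySem.List.min?_mem hmin
  have hi_top : ∀ y ∈ col, y ≤ hi := fun y hy => PySem.List.max?_isMax hmax y hy
  have lo_bot : ∀ y ∈ col, lo ≤ y := fun y hy => PySem.List.min?_isMin hmin y hy
  unfold colWidth
  rw [if_neg (by simp [hcol]), hmax, hmin]
  simp only [Option.getD_some]
  -- the first candidate is W hi when hi ≥ 0
  have hw0 : (if 0 ≤ hi then (if hi = 0 then (1 : Int) else digitsB hi 0) else 0)
      = if 0 ≤ hi then W hi else 0 := by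
    by_cases h : 0 ≤ hi
    · rw [if_pos h, if_pos h]
      by_cases h0 : hi = 0
      · subst h0
        rw [if_pos rfl, W_eq, if_neg (by omega)]
        rw [show (0 : Int).toNat = 0 from rfl, digCount_of_lt (by norm_num)]
        simp
      · rw [if_neg h0, W_of_pos hi (by omega)]
    · rw [if_neg h, if_neg h]
  rw [hw0]
  set w0 : Int := if 0 ≤ hi then W hi else 0 with hw0def
  have hw0_nonneg : 0 ≤ w0 := by
    rw [hw0def]; split_ifs with h
    · exact le_trans (by norm_num) (W_pos hi)
    · exact le_rfl
  by_cases hlo : lo < 0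
  · rw [if_pos hlo, ← W_of_neg lo hlo]
    apply le_antisymm
    · apply foldl_max_le
      · exact le_trans hw0_nonneg (le_max_left _ _)
      · intro x hx
        by_cases hx0 : 0 ≤ x
        · have hhi0 : 0 ≤ hi := le_trans hx0 (hi_top x hx)
          have hWle : W x ≤ W hi := by
            rw [W_eq, W_eq, if_neg (by omega), if_neg (by omega)]
            have := digCount_mono hi.toNat x.toNat (by have := hi_top x hx; omega)
            omega
          calc W x ≤ W hi := hWle
            _ = w0 := by rw [hw0def, if_pos hhi0]
            _ ≤ max w0 (W lo) := le_max_left _ _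
        · have hxneg : x < 0 := by omega
          have hWle : W x ≤ W lo := by
            have hl := lo_bot x hx
            rw [W_eq, W_eq, if_pos hxneg, if_pos hlo]
            have := digCount_mono lo.natAbs x.natAbs (by omega)
            omega
          exact le_trans hWle (le_max_right _ _)
    · apply max_le
      · rw [hw0def]; split_ifs with h
        · exact mem_le_foldl W col 0 hi hi_mem
        · exact init_le_foldl W col 0
      · exact mem_le_foldl W col 0 lo lo_mem
  · rw [if_neg hlo]
    have hhi0 : 0 ≤ hi := le_trans (by omega) (lo_bot hi hi_mem)
    have hw0W : w0 = W hi := by rw [hw0def, if_pos hhi0]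
    apply le_antisymm
    · apply foldl_max_le
      · exact hw0_nonneg
      intro x hx
      have hx0 : 0 ≤ x := le_trans (by omega) (lo_bot x hx)
      have hWle : W x ≤ W hi := by
        rw [W_eq, W_eq, if_neg (by omega), if_neg (by omega)]
        have := digCount_mono hi.toNat x.toNat (by have := hi_top x hx; omega)
        omega
      rw [hw0W]; exact hWle
    · rw [hw0W]; exact mem_le_foldl W col 0 hi hi_mem

-- inner loop of A: the row-wise update pass is a pointwise max against the row
lemma inner_loop_eq (line : List Int) :
    ∀ (N : Nat) (w : List Int), N ≤ w.length →
    (List.range N).foldl (fun w k =>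
        if w.getD k 0 < line.getD k 0 then w.set k (line.getD k 0) else w) w
      = (List.range N).map (fun k => max (w.getD k 0) (line.getD k 0)) ++ w.drop N := by
  intro N
  induction N with
  | zero => intro w _; simp
  | succ N ih =>
    intro w hw
    have hN : N < w.length := by omega
    rw [List.range_succ, List.foldl_append, ih w (by omega)]
    have hdrop : w.drop N = w.getD N 0 :: w.drop (N + 1) := by
      rw [List.getD_eq_getElem _ _ hN]
      exact (List.drop_eq_getElem_cons hN)
    have hlen : ((List.range N).map (fun k => max (w.getD k 0) (line.getD k 0))).length = N := by simp
    have hget : ((List.range N).map (fun k => max (w.getD k 0) (line.getD k 0)) ++ w.drop N).getD N 0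
        = w.getD N 0 := by
      rw [List.getD_eq_getElem?_getD, List.getElem?_append_right (le_of_eq hlen), hlen, Nat.sub_self, hdrop]
      rfl
    simp only [List.foldl_cons, List.foldl_nil]
    rw [hget]
    by_cases h : w.getD N 0 < line.getD N 0
    · rw [if_pos h]
      rw [hdrop, List.set_append_right _ _ (by omega), hlen]
      simp only [Nat.sub_self, List.set_cons_zero]
      rw [List.map_append, List.map_singleton, List.append_assoc, List.cons_append, List.nil_append]
      congr 2
      exact (max_eq_right (le_of_lt h)).symm
    · rw [if_neg h]
      rw [hdrop, List.map_append, List.map_singleton, List.append_assoc, List.cons_append, List.nil_append]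
      congr 2
      exact (max_eq_left (not_lt.mp h)).symm

-- outer loop of A: folding rows starting from a column-indexed table keeps it a table of running maxes
lemma outer_loop_eq (N : Nat) :
    ∀ (rows : List (List Int)) (h : Nat → Int),
    (∀ r ∈ rows, N ≤ r.length) →
    rows.foldl (fun w line =>
        (List.range N).foldl (fun w k =>
          if w.getD k 0 < line.getD k 0 then w.set k (line.getD k 0) else w) w)
      ((List.range N).map h)
      = (List.range N).map (fun k => rows.foldl (fun a r => max a (r.getD k 0)) (h k)) := by
  intro rows
  induction rows with
  | nil => intro h _; simp
  | cons r t ih =>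
    intro h hlen
    rw [List.foldl_cons,
      inner_loop_eq r N ((List.range N).map h) (by simp),
      List.drop_eq_nil_of_le (by simp), List.append_nil]
    have : (List.range N).map (fun k => max (((List.range N).map h).getD k 0) (r.getD k 0))
        = (List.range N).map (fun k => max (h k) (r.getD k 0)) := by
      apply List.map_congr_left
      intro k hk
      rw [PySem.List.getD_map_range h N k 0 (List.mem_range.mp hk)]
    rw [this, ih (fun k => max (h k) (r.getD k 0)) (fun r hr => hlen r (List.mem_cons_of_mem _ hr))]
    simp

-- ===== VERDICT (by name: the statement is the Claim_ definition above) =====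
theorem lenth_spec : Claim_equal_lenth := by
  intro info num_col _ hpre
  unfold Spec_lenth lenth lenth_alt
  simp only []
  rw [PySem.List.pyRange_one 0 num_col]
  simp only [zero_add, sub_zero, List.foldl_map, List.map_map, Function.comp_def]
  set N := num_col.toNat with hNdef
  have hrowlen : ∀ r ∈ info.map (fun line => line.map (fun item => PySem.Str.len (PySem.Int.toStr item))),
      N ≤ r.length := by
    intro r hr
    rcases List.mem_map.mp hr with ⟨row, hrow, rfl⟩
    rcases hpre with hle | hall
    · simp only [List.length_map]; omega
    · have := hall row hrow
      simp only [List.length_map]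
      omega
  -- A's nested loops = table of per-column running maxes
  have hA : (info.map (fun line => line.map (fun item => PySem.Str.len (PySem.Int.toStr item)))).foldl
      (fun w line => (List.range N).foldl (fun w (k : Nat) =>
        if PySem.List.pyGetD w ((k:Int)) 0 < PySem.List.pyGetD line (k:Int) 0 then
          PySem.List.pySetD w (k:Int) (PySem.List.pyGetD line (k:Int) 0) else w) w)
      ((List.range N).map (fun _ => (0:Int)))
      = (List.range N).map (fun k =>
          (info.map (fun line => line.map (fun item => PySem.Str.len (PySem.Int.toStr item)))).foldl
            (fun a r => max a (r.getD k 0)) 0) := by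
    have hin : ∀ (w line : List Int),
        (List.range N).foldl (fun w (k : Nat) =>
          if PySem.List.pyGetD w ((k:Int)) 0 < PySem.List.pyGetD line (k:Int) 0 then
            PySem.List.pySetD w (k:Int) (PySem.List.pyGetD line (k:Int) 0) else w) w
        = (List.range N).foldl (fun w k =>
            if w.getD k 0 < line.getD k 0 then w.set k (line.getD k 0) else w) w := by
      intro w line
      apply List.foldl_ext _ _ _
      intro acc a _
      simp [PySem.List.pyGetD_natCast, PySem.List.pySetD_natCast]
    calc _ = (info.map (fun line => line.map (fun item => PySem.Str.len (PySem.Int.toStr item)))).foldl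
          (fun w line => (List.range N).foldl (fun w k =>
            if w.getD k 0 < line.getD k 0 then w.set k (line.getD k 0) else w) w)
          ((List.range N).map (fun _ => (0:Int))) := by
          apply List.foldl_ext _ _ _
          intro acc line _; exact hin acc line
      _ = _ := outer_loop_eq N _ (fun _ => (0:Int)) hrowlen
  rw [List.foldl_map] at hA
  rw [hA]
  apply List.map_congr_left
  intro k hk
  -- per-column: A's running max over the k-th lengths = B's extremes-based colWidth
  have hlen' : ∀ row ∈ info, k < row.length := by
    intro row hrow
    rcases hpre with hle | hall
    · exfalso
      have hz : N = 0 := by omega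
      rw [hz] at hk; simp at hk
    · have h1 := hall row hrow
      have h2 : (k : Int) < (N : Int) := by exact_mod_cast List.mem_range.mp hk
      have h3 : (N : Int) ≤ num_col := by omega
      omega
  have hcol : ∀ row ∈ info,
      (row.map (fun item => PySem.Str.len (PySem.Int.toStr item))).getD k 0
      = PySem.Str.len (PySem.Int.toStr (PySem.List.pyGetD row (k:Int) 0)) := by
    intro row hrow
    have hk' := hlen' row hrow
    rw [List.getD_eq_getElem _ _ (by simpa using hk'), List.getElem_map]
    simp [PySem.List.pyGetD_natCast, List.getD_eq_getElem?_getD, List.getElem?_eq_getElem hk']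
  have hsteps : info.foldl (fun a row => max a ((row.map (fun item => PySem.Str.len (PySem.Int.toStr item))).getD k 0)) 0
      = info.foldl (fun a row => max a (PySem.Str.len (PySem.Int.toStr (PySem.List.pyGetD row (k:Int) 0)))) 0 := by
    apply List.foldl_ext _ _ _
    intro acc row hrow; rw [hcol row hrow]
  have hfold : (info.map (fun line => PySem.List.pyGetD line (k:Int) 0)).foldl
      (fun a x => max a (PySem.Str.len (PySem.Int.toStr x))) 0
      = info.foldl (fun a row => max a (PySem.Str.len (PySem.Int.toStr (PySem.List.pyGetD row (k:Int) 0)))) 0 := by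
    rw [List.foldl_map]
  rw [List.foldl_map, hsteps, ← hfold]
  exact colWidth_eq (info.map (fun line => PySem.List.pyGetD line (k:Int) 0))
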